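-- pv_equiv track=rewrite | github.com/SirDrone/Rdle_Solver | rdle_solver.py | __recolor
-- ===== SOURCE A (Python) =====
-- def __recolor(guess, colors):
--     color_map = {}
--     for i in range(0, len(guess)):
--         g = guess[i]
--         c = colors[i]
--         mapped_color = color_map.get(g)
--         if mapped_color != None:
--             if mapped_color == 'b' and c != 'b':
--                 color_map.update({g:c})
--         else:
--             color_map.update({g:c})
--     return ''.join(map(str, [ 'y' if (color_map.get(guess[i]) != 'b' and colors[i] == 'b') \
--             else colors[i] for i in range(0, len(guess)) ]))
-- ===== SOURCE B (Python) =====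
-- def __recolor(guess, colors):
--     # Stateless per-position rule: a 'b' turns 'y' iff the same letter occurs
--     # anywhere in the guess with a non-'b' color.
--     return ''.join(
--         'y' if colors[i] == 'b' and any(guess[j] == guess[i] and colors[j] != 'b'
--                                         for j in range(0, len(guess)))
--         else colors[i]
--         for i in range(0, len(guess)))
-- ===== Notes on version B (the rewrite author's own statement) =====
-- stated objective: alternative
-- what changed: Drops A's stateful dict-building pass entirely: B keeps no auxiliary structure and decides each position directly with an inner any() scan ('does this letter occur anywhere with a non-b color'), a stateless quantifier rule instead of a marking pass.
import Mathlib
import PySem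

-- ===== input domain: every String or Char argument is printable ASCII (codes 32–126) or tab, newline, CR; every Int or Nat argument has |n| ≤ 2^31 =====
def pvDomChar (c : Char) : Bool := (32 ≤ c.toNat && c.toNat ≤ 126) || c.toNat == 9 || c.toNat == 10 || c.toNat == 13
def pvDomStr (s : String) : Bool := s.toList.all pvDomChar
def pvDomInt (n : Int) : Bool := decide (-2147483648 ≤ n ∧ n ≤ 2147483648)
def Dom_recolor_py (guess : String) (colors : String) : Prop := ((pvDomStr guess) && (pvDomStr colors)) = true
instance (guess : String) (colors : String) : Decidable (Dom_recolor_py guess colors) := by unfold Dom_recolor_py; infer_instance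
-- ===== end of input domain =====

-- B drops A's dict-building pass and decides each position statelessly with an inner any-scan (a different, stateless decomposition; not faster).
-- Pre_ excludes inputs where colors is shorter than guess, on which Python A (and B) raise IndexError.


-- ===== PORT A =====
-- one step of A's first loop: the conditional-upgrade update of the color map
def recolorStepA (gs cs : List Char) (m : PySem.Dict Char Char) (i : Nat) : PySem.Dict Char Char :=
  match PySem.Dict.get? m (gs.getD i ' ') with
  | some mc => if mc = 'b' ∧ cs.getD i ' ' ≠ 'b' then m.insert (gs.getD i ' ') (cs.getD i ' ') else m
  | none => m.insert (gs.getD i ' ') (cs.getD i ' ')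

def recolor_py (guess : String) (colors : String) : String :=
  let gs := guess.toList
  let cs := colors.toList
  let cmap := (List.range gs.length).foldl (recolorStepA gs cs) PySem.Dict.empty
  String.ofList ((List.range gs.length).map (fun i =>
    if PySem.Dict.get? cmap (gs.getD i ' ') ≠ some 'b' ∧ cs.getD i ' ' = 'b' then 'y'
    else cs.getD i ' '))

-- ===== PORT B =====
-- B keeps no state: each position is decided by an inner any-scan over the whole guess
def recolor_py_alt (guess : String) (colors : String) : String :=
  let gs := guess.toList
  let cs := colors.toList
  String.ofList ((List.range gs.length).map (fun i =>
    if cs.getD i ' ' = 'b' ∧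
        (List.range gs.length).any (fun j => gs.getD j ' ' = gs.getD i ' ' ∧ cs.getD j ' ' ≠ 'b') = true
    then 'y' else cs.getD i ' '))

-- ===== PRECONDITION & SPEC =====
-- Pre_: colors must be at least as long as guess; otherwise Python's colors[i]/colors[j] raises IndexError in both programs.
def Pre_recolor_py (guess : String) (colors : String) : Prop :=
  guess.toList.length ≤ colors.toList.length
instance (guess : String) (colors : String) : Decidable (Pre_recolor_py guess colors) := by
  unfold Pre_recolor_py; infer_instance

def pvWitness_recolor_py : String × String := ("aabca", "bgbbb")

def Spec_recolor_py (guess : String) (colors : String) (out : String) : Prop := out = recolor_py_alt guess colors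
instance (guess : String) (colors : String) (out : String) : Decidable (Spec_recolor_py guess colors out) := by unfold Spec_recolor_py; infer_instance

-- ===== CLAIM (what is proved, stated in full; the proofs are below) =====
def Claim_equal_recolor_py : Prop := ∀ (guess : String) (colors : String), Dom_recolor_py guess colors → Pre_recolor_py guess colors → Spec_recolor_py guess colors (recolor_py guess colors)

-- ===== LEMMAS AND PROOFS =====

-- how one step of A's loop changes a lookup
theorem stepA_get?_ne (gs cs : List Char) (m : PySem.Dict Char Char) (n : Nat) (g : Char)
    (hg : g ≠ gs.getD n ' ') :
    PySem.Dict.get? (recolorStepA gs cs m n) g = PySem.Dict.get? m g := by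
  unfold recolorStepA
  rcases h : PySem.Dict.get? m (gs.getD n ' ') with _ | mc
  · show (m.insert (gs.getD n ' ') (cs.getD n ' ')).get? g = _
    exact PySem.Dict.get?_insert_of_ne _ _ hg
  · show (if mc = 'b' ∧ cs.getD n ' ' ≠ 'b' then m.insert (gs.getD n ' ') (cs.getD n ' ') else m).get? g = _
    split_ifs with hc
    · exact PySem.Dict.get?_insert_of_ne _ _ hg
    · rfl

theorem stepA_get?_none (gs cs : List Char) (m : PySem.Dict Char Char) (n : Nat)
    (h : PySem.Dict.get? m (gs.getD n ' ') = none) :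
    PySem.Dict.get? (recolorStepA gs cs m n) (gs.getD n ' ') = some (cs.getD n ' ') := by
  unfold recolorStepA
  rw [h]
  show (m.insert (gs.getD n ' ') (cs.getD n ' ')).get? (gs.getD n ' ') = _
  exact PySem.Dict.get?_insert_self _ _ _

theorem stepA_get?_some (gs cs : List Char) (m : PySem.Dict Char Char) (n : Nat) (mc : Char)
    (h : PySem.Dict.get? m (gs.getD n ' ') = some mc) :
    PySem.Dict.get? (recolorStepA gs cs m n) (gs.getD n ' ') =
      if mc = 'b' ∧ cs.getD n ' ' ≠ 'b' then some (cs.getD n ' ') else some mc := by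
  unfold recolorStepA
  rw [h]
  show (if mc = 'b' ∧ cs.getD n ' ' ≠ 'b' then m.insert (gs.getD n ' ') (cs.getD n ' ') else m).get? (gs.getD n ' ') = _
  split_ifs with hc
  · exact PySem.Dict.get?_insert_self _ _ _
  · exact h

-- The invariant of A's dict-building loop over range n: the map knows exactly the letters
-- seen so far, and its value is 'b' exactly when all colors seen for the letter were 'b'.
theorem recolor_inv (gs cs : List Char) (n : Nat) (g : Char) :
    (PySem.Dict.get? ((List.range n).foldl (recolorStepA gs cs) PySem.Dict.empty) g = none
        ↔ ∀ j < n, gs.getD j ' ' ≠ g)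
    ∧ (PySem.Dict.get? ((List.range n).foldl (recolorStepA gs cs) PySem.Dict.empty) g = some 'b'
        ↔ (∃ j < n, gs.getD j ' ' = g) ∧ ∀ j < n, gs.getD j ' ' = g → cs.getD j ' ' = 'b') := by
  induction n with
  | zero =>
    refine ⟨?_, ?_⟩ <;> simp [PySem.Dict.get?_empty]
  | succ n ih =>
    obtain ⟨ih1, ih2⟩ := ih
    rw [List.range_succ, List.foldl_append]
    simp only [List.foldl_cons, List.foldl_nil]
    set m := (List.range n).foldl (recolorStepA gs cs) PySem.Dict.empty with hm
    have hlt : ∀ (P : Nat → Prop), (∀ j < n + 1, P j) ↔ (∀ j < n, P j) ∧ P n := by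
      intro P
      constructor
      · intro h; exact ⟨fun j hj => h j (Nat.lt_succ_of_lt hj), h n (Nat.lt_succ_self n)⟩
      · rintro ⟨h1, h2⟩ j hj
        rcases Nat.lt_succ_iff_lt_or_eq.mp hj with h | h
        · exact h1 j h
        · subst h; exact h2
    have hex : ∀ (P : Nat → Prop), (∃ j < n + 1, P j) ↔ (∃ j < n, P j) ∨ P n := by
      intro P
      constructor
      · rintro ⟨j, hj, hp⟩
        rcases Nat.lt_succ_iff_lt_or_eq.mp hj with h | h
        · exact Or.inl ⟨j, h, hp⟩
        · subst h; exact Or.inr hp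
      · rintro (⟨j, hj, hp⟩ | hp)
        · exact ⟨j, Nat.lt_succ_of_lt hj, hp⟩
        · exact ⟨n, Nat.lt_succ_self n, hp⟩
    simp only [hlt, hex]
    refine ⟨?_, ?_⟩
    · -- part 1: get? = none
      by_cases hg : g = gs.getD n ' '
      · subst hg
        rcases h : PySem.Dict.get? m (gs.getD n ' ') with _ | mc
        · rw [stepA_get?_none gs cs m n h]
          simp
        · rw [stepA_get?_some gs cs m n mc h]
          split_ifs <;> simp
      · have hg' : gs.getD n ' ' ≠ g := fun he => hg he.symm
        rw [stepA_get?_ne gs cs m n g hg, ih1]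
        tauto
    · -- part 2: get? = some 'b'
      by_cases hg : g = gs.getD n ' '
      · subst hg
        rcases h : PySem.Dict.get? m (gs.getD n ' ') with _ | mc
        · have hnotseen : ∀ j < n, gs.getD j ' ' ≠ gs.getD n ' ' := ih1.mp h
          have hA : ∀ j < n, gs.getD j ' ' = gs.getD n ' ' → cs.getD j ' ' = 'b' :=
            fun j hj hp => absurd hp (hnotseen j hj)
          rw [stepA_get?_none gs cs m n h]
          constructor
          · intro hsome
            have hcb : cs.getD n ' ' = 'b' := by injection hsome
            exact ⟨Or.inr rfl, hA, fun _ => hcb⟩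
          · rintro ⟨_, _, hcb⟩
            rw [hcb rfl]
        · have hQ : ∃ j < n, gs.getD j ' ' = gs.getD n ' ' := by
            have hne : ¬ ∀ j < n, gs.getD j ' ' ≠ gs.getD n ' ' := by
              intro hall
              rw [ih1.mpr hall] at h; cases h
            push Not at hne
            exact hne
          have hB : mc = 'b' ↔ (∃ j < n, gs.getD j ' ' = gs.getD n ' ') ∧
              ∀ j < n, gs.getD j ' ' = gs.getD n ' ' → cs.getD j ' ' = 'b' := by
            rw [h] at ih2
            rw [← ih2]
            constructor
            · intro he; rw [he]
            · intro he; injection he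
          rw [stepA_get?_some gs cs m n mc h]
          by_cases hc : mc = 'b' ∧ cs.getD n ' ' ≠ 'b'
          · rw [if_pos hc]
            constructor
            · intro hsome
              have : cs.getD n ' ' = 'b' := by injection hsome
              exact absurd this hc.2
            · rintro ⟨_, _, hcb⟩
              exact absurd (hcb rfl) hc.2
          · rw [if_neg hc]
            constructor
            · intro hsome
              have hmc : mc = 'b' := by injection hsome
              have hA := (hB.mp hmc).2
              have hcb : cs.getD n ' ' = 'b' := by
                by_contra hne; exact hc ⟨hmc, hne⟩
              exact ⟨Or.inr rfl, hA, fun _ => hcb⟩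
            · rintro ⟨_, hA, _⟩
              rw [hB.mpr ⟨hQ, hA⟩]
      · have hg' : gs.getD n ' ' ≠ g := fun he => hg he.symm
        rw [stepA_get?_ne gs cs m n g hg, ih2]
        constructor
        · rintro ⟨hQ, hA⟩
          exact ⟨Or.inl hQ, hA, fun he => absurd he hg'⟩
        · rintro ⟨hQ, hA, _⟩
          rcases hQ with hQ | hQ
          · exact ⟨hQ, hA⟩
          · exact absurd hQ hg'

-- B's inner any-scan as an existential
theorem any_scan_iff (gs cs : List Char) (n : Nat) (g : Char) :
    (List.range n).any (fun j => gs.getD j ' ' = g ∧ cs.getD j ' ' ≠ 'b') = true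
      ↔ ∃ j < n, gs.getD j ' ' = g ∧ cs.getD j ' ' ≠ 'b' := by
  simp [List.any_eq_true, List.mem_range]

-- ===== VERDICT (by name: the statement is the Claim_ definition above) =====
theorem recolor_py_spec : Claim_equal_recolor_py := by
  intro guess colors _ _
  unfold Spec_recolor_py recolor_py recolor_py_alt
  simp only []
  congr 1
  apply List.map_congr_left
  intro i hi
  have hi' := List.mem_range.mp hi
  set gs := guess.toList
  set cs := colors.toList
  obtain ⟨inv1, inv2⟩ := recolor_inv gs cs gs.length (gs.getD i ' ')
  have hseen : ∃ j < gs.length, gs.getD j ' ' = gs.getD i ' ' := ⟨i, hi', rfl⟩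
  by_cases hcb : cs.getD i ' ' = 'b'
  · -- colors[i] = 'b': both return 'y' exactly when some occurrence of guess[i] is non-'b'
    have key : (PySem.Dict.get? ((List.range gs.length).foldl (recolorStepA gs cs) PySem.Dict.empty) (gs.getD i ' ') ≠ some 'b')
        ↔ (List.range gs.length).any (fun j => gs.getD j ' ' = gs.getD i ' ' ∧ cs.getD j ' ' ≠ 'b') = true := by
      rw [any_scan_iff]
      constructor
      · intro hne
        by_contra hnot
        apply hne
        rw [inv2]
        refine ⟨hseen, ?_⟩
        intro j hj hjg
        by_contra hcne
        exact hnot ⟨j, hj, hjg, hcne⟩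
      · rintro ⟨j, hj, hjg, hjc⟩ hsome
        exact hjc ((inv2.mp hsome).2 j hj hjg)
    by_cases hA : PySem.Dict.get? ((List.range gs.length).foldl (recolorStepA gs cs) PySem.Dict.empty) (gs.getD i ' ') ≠ some 'b'
    · rw [if_pos ⟨hA, hcb⟩, if_pos ⟨hcb, key.mp hA⟩]
    · rw [if_neg (fun h => hA h.1), if_neg (fun h => hA (key.mpr h.2))]
  · rw [if_neg (fun h => hcb h.2), if_neg (fun h => hcb h.1)]
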